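-- pv_equiv track=rewrite | github.com/mecrengland/AES-Project | AES.py | TransformToStateArray
-- ===== SOURCE A (Python) =====
-- import math
--
-- def TransformToStateArray(inputBytes):
--
--     row0 = []
--     row1 = []
--     row2 = []
--     row3 = []
--
--     # Places bytes in corresponding rows of state array
--     for i in range(0, int(math.ceil(len(inputBytes)/8))):
--
--         byteToAdd = inputBytes[i*8:(i+1)*8]
--
--         if(i%4 == 0):
--             row0.append(byteToAdd)
--         elif(i%4 == 1):
--             row1.append(byteToAdd)
--         elif(i%4 == 2):
--             row2.append(byteToAdd)
--         elif(i%4 == 3):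
--             row3.append(byteToAdd)
--
--     return [row0, row1, row2, row3]
-- ===== SOURCE B (Python) =====
-- import math
--
-- def TransformToStateArray(inputBytes):
--     n = int(math.ceil(len(inputBytes)/8))
--     return [[inputBytes[i*8:(i+1)*8] for i in range(r, n, 4)] for r in range(4)]
-- ===== Notes on version B (the rewrite author's own statement) =====
-- stated objective: idiomatic
-- what changed: B builds each of the 4 rows directly with a strided range(r, n, 4) comprehension instead of A's single loop that dispatches each chunk into one of four accumulator lists by an i%4 if/elif chain.
import Mathlib
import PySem

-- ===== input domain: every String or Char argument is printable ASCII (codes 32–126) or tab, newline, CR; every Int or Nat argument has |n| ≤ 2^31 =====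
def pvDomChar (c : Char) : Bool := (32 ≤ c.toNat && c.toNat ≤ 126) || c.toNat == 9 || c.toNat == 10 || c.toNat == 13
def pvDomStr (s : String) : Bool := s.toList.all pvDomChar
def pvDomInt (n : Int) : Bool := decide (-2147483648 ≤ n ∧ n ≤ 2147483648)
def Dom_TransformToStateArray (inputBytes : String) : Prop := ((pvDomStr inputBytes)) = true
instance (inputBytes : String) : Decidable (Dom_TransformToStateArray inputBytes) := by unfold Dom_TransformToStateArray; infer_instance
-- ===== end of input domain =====

-- B replaces A's i%4 if/elif dispatch into four accumulators by building each row directly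
-- with a strided range(r, n, 4); objective: idiomatic (no speed claim).
-- Both ports render Python's `int(math.ceil(len(inputBytes)/8))` as the integer ceiling
-- (len+7)//8: division of an int by 8 only shifts the float exponent, so `len/8` is exact
-- (and its ceil the integer ceil) for every length a real string can have.

-- ===== PORT A =====
def TransformToStateArray (inputBytes : String) : List (List String) :=
  let rows :=
    (PySem.List.pyRange 0 (PySem.Int.floordiv (PySem.Str.len inputBytes + 7) 8) 1).foldl
      (fun (st : List String × List String × List String × List String) i =>
        let byteToAdd := PySem.Str.slice inputBytes (some (i*8)) (some ((i+1)*8))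
        if PySem.Int.mod i 4 = 0 then (st.1 ++ [byteToAdd], st.2.1, st.2.2.1, st.2.2.2)
        else if PySem.Int.mod i 4 = 1 then (st.1, st.2.1 ++ [byteToAdd], st.2.2.1, st.2.2.2)
        else if PySem.Int.mod i 4 = 2 then (st.1, st.2.1, st.2.2.1 ++ [byteToAdd], st.2.2.2)
        else if PySem.Int.mod i 4 = 3 then (st.1, st.2.1, st.2.2.1, st.2.2.2 ++ [byteToAdd])
        else st)
      ([], [], [], [])
  [rows.1, rows.2.1, rows.2.2.1, rows.2.2.2]

-- ===== PORT B =====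
def TransformToStateArray_alt (inputBytes : String) : List (List String) :=
  let n := PySem.Int.floordiv (PySem.Str.len inputBytes + 7) 8
  (PySem.List.pyRange 0 4 1).map (fun r =>
    (PySem.List.pyRange r n 4).map (fun i =>
      PySem.Str.slice inputBytes (some (i*8)) (some ((i+1)*8))))

-- ===== PRECONDITION & SPEC =====
def Spec_TransformToStateArray (inputBytes : String) (out : List (List String)) : Prop := out = TransformToStateArray_alt inputBytes
instance (inputBytes : String) (out : List (List String)) : Decidable (Spec_TransformToStateArray inputBytes out) := by unfold Spec_TransformToStateArray; infer_instance

-- ===== CLAIM (what is proved, stated in full; the proofs are below) =====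
def Claim_equal_TransformToStateArray : Prop := ∀ (inputBytes : String), Dom_TransformToStateArray inputBytes → Spec_TransformToStateArray inputBytes (TransformToStateArray inputBytes)

-- ===== LEMMAS AND PROOFS =====

-- the chunk inputBytes[i*8:(i+1)*8] and the row r of B
def pvChunk (s : String) (i : Int) : String :=
  PySem.Str.slice s (some (i*8)) (some ((i+1)*8))

def pvRow (s : String) (r m : Int) : List String :=
  (PySem.List.pyRange r m 4).map (fun i => pvChunk s i)

-- A's loop body
def pvBody (s : String) (st : List String × List String × List String × List String) (i : Int) :
    List String × List String × List String × List String :=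
  let byteToAdd := PySem.Str.slice s (some (i*8)) (some ((i+1)*8))
  if PySem.Int.mod i 4 = 0 then (st.1 ++ [byteToAdd], st.2.1, st.2.2.1, st.2.2.2)
  else if PySem.Int.mod i 4 = 1 then (st.1, st.2.1 ++ [byteToAdd], st.2.2.1, st.2.2.2)
  else if PySem.Int.mod i 4 = 2 then (st.1, st.2.1, st.2.2.1 ++ [byteToAdd], st.2.2.2)
  else if PySem.Int.mod i 4 = 3 then (st.1, st.2.1, st.2.2.1, st.2.2.2 ++ [byteToAdd])
  else st

-- extending the strided range by one upper bound step
lemma pyRange4_succ (r : Int) (m : Nat) (hr : 0 ≤ r) (h4 : r < 4) :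
    PySem.List.pyRange r ((m : Int) + 1) 4 =
      (if (m : Int) % 4 = r then PySem.List.pyRange r (m : Int) 4 ++ [(m : Int)]
       else PySem.List.pyRange r (m : Int) 4) := by
  rw [PySem.List.pyRange_of_pos r ((m:Int)+1) (by norm_num),
      PySem.List.pyRange_of_pos r (m:Int) (by norm_num)]
  by_cases h : (m : Int) % 4 = r
  · rw [if_pos h]
    by_cases hrm : r < (m:Int)
    · have e1 : (((m:Int)+1 - r + 4 - 1)/4).toNat = (((m:Int) - r + 4 - 1)/4).toNat + 1 := by omega
      rw [if_pos (by omega : r < (m:Int)+1), if_pos hrm, e1, List.range_succ, List.map_append]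
      congr 1
      simp
      omega
    · have e1 : (((m:Int)+1 - r + 4 - 1)/4).toNat = 1 := by omega
      rw [if_pos (by omega : r < (m:Int)+1), if_neg hrm, e1]
      simp
      omega
  · rw [if_neg h]
    have e : (if r < (m:Int)+1 then (((m:Int)+1 - r + 4 - 1)/4).toNat else 0)
           = (if r < (m:Int) then (((m:Int) - r + 4 - 1)/4).toNat else 0) := by
      split_ifs <;> omega
    rw [e]

lemma pvRow_succ (s : String) (r : Int) (m : Nat) (hr : 0 ≤ r) (h4 : r < 4) :
    pvRow s r ((m : Int) + 1) =
      (if (m : Int) % 4 = r then pvRow s r (m : Int) ++ [pvChunk s (m : Int)]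
       else pvRow s r (m : Int)) := by
  unfold pvRow
  rw [pyRange4_succ r m hr h4]
  split_ifs <;> simp

lemma loop_eq (s : String) (N : Nat) :
    (PySem.List.pyRange 0 (N : Int) 1).foldl (pvBody s) ([], [], [], []) =
      (pvRow s 0 N, pvRow s 1 N, pvRow s 2 N, pvRow s 3 N) := by
  induction N with
  | zero =>
      simp [pvRow, show PySem.List.pyRange 0 0 1 = [] from by decide,
            show PySem.List.pyRange 0 0 4 = [] from by decide,
            show PySem.List.pyRange 1 0 4 = [] from by decide,
            show PySem.List.pyRange 2 0 4 = [] from by decide,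
            show PySem.List.pyRange 3 0 4 = [] from by decide]
  | succ m ih =>
      have hcast : ((m + 1 : Nat) : Int) = (m : Int) + 1 := by push_cast; ring
      rw [hcast, PySem.List.pyRange_one_succ_right (by positivity), List.foldl_append, ih]
      simp only [List.foldl_cons, List.foldl_nil]
      rw [pvRow_succ s 0 m (by norm_num) (by norm_num), pvRow_succ s 1 m (by norm_num) (by norm_num),
          pvRow_succ s 2 m (by norm_num) (by norm_num), pvRow_succ s 3 m (by norm_num) (by norm_num)]
      unfold pvBody pvChunk
      rw [PySem.Int.mod_eq_emod_of_pos (by norm_num : (0:Int) < 4)]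
      have h4 : (m:Int)%4 = 0 ∨ (m:Int)%4 = 1 ∨ (m:Int)%4 = 2 ∨ (m:Int)%4 = 3 := by omega
      rcases h4 with h|h|h|h <;> simp [h]

lemma portA_eq (s : String) (N : Nat) (hN : (N : Int) = PySem.Int.floordiv (PySem.Str.len s + 7) 8) :
    TransformToStateArray s = [pvRow s 0 N, pvRow s 1 N, pvRow s 2 N, pvRow s 3 N] := by
  unfold TransformToStateArray
  rw [← hN]
  show (let rows := (PySem.List.pyRange 0 (N : Int) 1).foldl (pvBody s) ([], [], [], [])
        [rows.1, rows.2.1, rows.2.2.1, rows.2.2.2]) = _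
  rw [loop_eq s N]

lemma portB_eq (s : String) (N : Nat) (hN : (N : Int) = PySem.Int.floordiv (PySem.Str.len s + 7) 8) :
    TransformToStateArray_alt s = [pvRow s 0 N, pvRow s 1 N, pvRow s 2 N, pvRow s 3 N] := by
  unfold TransformToStateArray_alt
  rw [← hN]
  rfl

-- ===== VERDICT (by name: the statement is the Claim_ definition above) =====
theorem TransformToStateArray_spec : Claim_equal_TransformToStateArray := by
  intro s _
  unfold Spec_TransformToStateArray
  have hlen : 0 ≤ PySem.Str.len s := by rw [PySem.Str.len_eq]; positivity
  have h0 : 0 ≤ PySem.Int.floordiv (PySem.Str.len s + 7) 8 := by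
    rw [PySem.Int.floordiv_eq_ediv_of_pos (by norm_num : (0:Int) < 8)]; omega
  obtain ⟨N, hN⟩ : ∃ N : Nat, (N : Int) = PySem.Int.floordiv (PySem.Str.len s + 7) 8 :=
    ⟨_, Int.toNat_of_nonneg h0⟩
  rw [portA_eq s N hN, portB_eq s N hN]
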